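-- pv_equiv track=rewrite | github.com/Ali-T-AbuSaleh/Course-Schedule-Maker | CoursesData/Course_IDs_getter.py | check_course_id_existence
-- ===== SOURCE A (Python) =====
-- COURSE_ID_LENGTH = 8
--
-- def check_course_id_existence(line: str) -> (bool, str):
--     mask = 0x10001000  # = 1 000 1 000
--
--     if len(line) < COURSE_ID_LENGTH: return False, ""
--
--     potential_id = line[-COURSE_ID_LENGTH:]
--     potential_id_hex = 0x0
--
--     for c in potential_id:
--         if not c.isdigit(): return False, ""
--         potential_id_hex = (potential_id_hex << 0x4) + int(c)
--
--     masking_result = mask & potential_id_hex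
--     if masking_result == 0:
--         return True, potential_id
--
--     return False, ""
-- ===== SOURCE B (Python) =====
-- def check_course_id_existence(line: str) -> (bool, str):
--     # B: direct reading of A's bit trick -- the 8-char suffix must be all digits
--     # with its 1st and 5th digits even; no bit-packing, no per-char loop.
--     if len(line) < 8:
--         return False, ""
--     pid = line[-8:]
--     if pid.isdigit() and int(pid[0]) % 2 == 0 and int(pid[4]) % 2 == 0:
--         return True, pid
--     return False, ""
-- ===== Notes on version B (the rewrite author's own statement) =====
-- stated objective: simpler
-- what changed: Replaced A's per-character BCD bit-packing loop and the 0x10001000 bitmask test by a direct check: the 8-char suffix is all digits and its 1st and 5th digits are even.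
import Mathlib
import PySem

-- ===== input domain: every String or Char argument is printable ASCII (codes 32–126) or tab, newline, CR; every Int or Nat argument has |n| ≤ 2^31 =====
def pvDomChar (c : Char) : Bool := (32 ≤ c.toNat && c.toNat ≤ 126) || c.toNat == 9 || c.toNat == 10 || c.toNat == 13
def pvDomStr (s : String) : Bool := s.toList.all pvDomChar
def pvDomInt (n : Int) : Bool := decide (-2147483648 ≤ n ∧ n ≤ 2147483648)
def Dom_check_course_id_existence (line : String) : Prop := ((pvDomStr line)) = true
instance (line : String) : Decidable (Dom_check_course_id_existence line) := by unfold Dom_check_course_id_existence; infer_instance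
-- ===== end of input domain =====

-- B replaces A's BCD bit-packing + 0x10001000 mask test by a direct
-- "suffix is all digits and its 1st and 5th digits are even" check (objective: simpler).

-- int(c) for an ASCII digit character (exact on the ASCII domain; both programs
-- call int(c) only on chars their preceding isdigit check accepted).
def pvDigitVal (c : Char) : Nat := c.toNat - 48

-- ===== PORT A =====
-- A's loop 'for c in potential_id': 'none' is the early 'return False, ""'.
-- The accumulator is a nonnegative Python int, kept as Nat; '<<< 4' is '<< 0x4'.
def pvPackLoop : List Char → Nat → Option Nat
  | [], acc => some acc
  | c :: cs, acc =>
    if ¬ PySem.Chars.isdigit c then none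
    else pvPackLoop cs ((acc <<< 4) + pvDigitVal c)

def check_course_id_existence (line : String) : Bool × String :=
  let mask : Nat := 0x10001000
  if PySem.Str.len line < 8 then (false, "")
  else
    let potential_id := PySem.Str.slice line (some (-8)) none
    match pvPackLoop potential_id.toList 0 with
    | none => (false, "")
    | some hex => if mask &&& hex = 0 then (true, potential_id) else (false, "")

-- ===== PORT B =====
def check_course_id_existence_alt (line : String) : Bool × String :=
  if PySem.Str.len line < 8 then (false, "")
  else
    let pid := PySem.Str.slice line (some (-8)) none
    if PySem.Str.strIsdigit pid
        && pvDigitVal (PySem.List.pyGetD pid.toList 0 ' ') % 2 == 0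
        && pvDigitVal (PySem.List.pyGetD pid.toList 4 ' ') % 2 == 0
    then (true, pid) else (false, "")

-- ===== PRECONDITION & SPEC =====
def Spec_check_course_id_existence (line : String) (out : Bool × String) : Prop := out = check_course_id_existence_alt line
instance (line : String) (out : Bool × String) : Decidable (Spec_check_course_id_existence line out) := by unfold Spec_check_course_id_existence; infer_instance

-- ===== CLAIM (what is proved, stated in full; the proofs are below) =====
def Claim_equal_check_course_id_existence : Prop := ∀ (line : String), Dom_check_course_id_existence line → Spec_check_course_id_existence line (check_course_id_existence line)

-- ===== LEMMAS AND PROOFS =====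

lemma pvIsdigit_iff (c : Char) : PySem.Chars.isdigit c = true ↔ 48 ≤ c.toNat ∧ c.toNat ≤ 57 := by
  unfold PySem.Chars.isdigit
  rw [Bool.and_eq_true, decide_eq_true_iff, decide_eq_true_iff, Char.le_def, Char.le_def,
    UInt32.le_iff_toNat_le, UInt32.le_iff_toNat_le]
  exact Iff.rfl

-- the bit-mask fact behind A: for a sum of disjoint nibble groups,
-- 0x10001000 & x = 0 iff the 2^28-nibble a and the 2^12-nibble b are even.
lemma pvKey (a m b r : Nat) (_ha : a < 16) (hm : m < 4096) (hb : b < 16) (hr : r < 4096) :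
    ((0x10001000 &&& (a * 2 ^ 28 + m * 2 ^ 16 + b * 2 ^ 12 + r) = 0) ↔ (a % 2 = 0 ∧ b % 2 = 0)) := by
  set x := a * 2 ^ 28 + m * 2 ^ 16 + b * 2 ^ 12 + r with hx
  have h28 : x.testBit 28 = decide (a % 2 = 1) := by
    have hdiv : x / 2 ^ 28 = a := by
      have hx' : x = 2 ^ 28 * a + (m * 2 ^ 16 + b * 2 ^ 12 + r) := by rw [hx]; ring
      rw [hx', Nat.mul_add_div (by norm_num), Nat.div_eq_of_lt (by omega)]
      exact Nat.add_zero _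
    have ht := Nat.testBit_div_two_pow (n := 28) x 0
    rw [Nat.zero_add] at ht
    rw [← ht, Nat.testBit_zero, hdiv]
  have h12 : x.testBit 12 = decide (b % 2 = 1) := by
    have hdiv : x / 2 ^ 12 = a * 2 ^ 16 + m * 2 ^ 4 + b := by
      have hx' : x = 2 ^ 12 * (a * 2 ^ 16 + m * 2 ^ 4 + b) + r := by rw [hx]; ring
      rw [hx', Nat.mul_add_div (by norm_num), Nat.div_eq_of_lt (by omega)]
      exact Nat.add_zero _
    have ht := Nat.testBit_div_two_pow (n := 12) x 0
    rw [Nat.zero_add] at ht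
    rw [← ht, Nat.testBit_zero, hdiv]
    have hpar : (a * 2 ^ 16 + m * 2 ^ 4 + b) % 2 = b % 2 := by omega
    rw [hpar]
  have hsplit : (0x10001000 : Nat) &&& x = (2 ^ 28 &&& x) ||| (2 ^ 12 &&& x) := by
    rw [show (0x10001000 : Nat) = 2 ^ 28 ||| 2 ^ 12 from by decide, Nat.and_comm,
      Nat.and_or_distrib_left, Nat.and_comm x (2 ^ 28), Nat.and_comm x (2 ^ 12)]
  rw [hsplit, Nat.two_pow_and, Nat.two_pow_and, h28, h12]
  by_cases ha2 : a % 2 = 1 <;> by_cases hb2 : b % 2 = 1 <;>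
    simp [ha2, hb2] <;> omega

lemma pvLen8 {α : Type} (t : List α) (h : t.length = 8) :
    ∃ a b c d e f g h', t = [a, b, c, d, e, f, g, h'] := by
  match t, h with
  | [a, b, c, d, e, f, g, h'], _ => exact ⟨a, b, c, d, e, f, g, h', rfl⟩

-- ===== VERDICT (by name: the statement is the Claim_ definition above) =====
theorem check_course_id_existence_spec : Claim_equal_check_course_id_existence := by
  intro line _hdom
  unfold Spec_check_course_id_existence check_course_id_existence check_course_id_existence_alt
  simp only [PySem.Str.len_eq, String.length_toList]
  by_cases hlen : ((line.length : Int) < 8)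
  · simp [hlen]
  · rw [if_neg hlen, if_neg hlen]
    have h8 : 8 ≤ line.toList.length := by
      rw [String.length_toList]; omega
    -- the 8-char suffix
    have hslice : PySem.List.slice line.toList (some (-8)) none
        = List.drop (line.toList.length - 8) line.toList :=
      PySem.List.slice_from_neg_ofNat line.toList 8 (by norm_num)
    obtain ⟨c0, c1, c2, c3, c4, c5, c6, c7, hT⟩ :=
      pvLen8 (List.drop (line.toList.length - 8) line.toList) (by simp; omega)
    simp only [PySem.Str.toList_slice, PySem.Chars.slice_eq_listSlice, hslice, hT]
    simp only [PySem.Str.strIsdigit, PySem.Str.toList_slice, PySem.Chars.slice_eq_listSlice,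
      hslice, hT]
    by_cases hd0 : PySem.Chars.isdigit c0
    case neg => simp [pvPackLoop, hd0, PySem.Chars.strIsdigit]
    by_cases hd1 : PySem.Chars.isdigit c1
    case neg => simp [pvPackLoop, hd0, hd1, PySem.Chars.strIsdigit]
    by_cases hd2 : PySem.Chars.isdigit c2
    case neg => simp [pvPackLoop, hd0, hd1, hd2, PySem.Chars.strIsdigit]
    by_cases hd3 : PySem.Chars.isdigit c3
    case neg => simp [pvPackLoop, hd0, hd1, hd2, hd3, PySem.Chars.strIsdigit]
    by_cases hd4 : PySem.Chars.isdigit c4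
    case neg => simp [pvPackLoop, hd0, hd1, hd2, hd3, hd4, PySem.Chars.strIsdigit]
    by_cases hd5 : PySem.Chars.isdigit c5
    case neg => simp [pvPackLoop, hd0, hd1, hd2, hd3, hd4, hd5, PySem.Chars.strIsdigit]
    by_cases hd6 : PySem.Chars.isdigit c6
    case neg => simp [pvPackLoop, hd0, hd1, hd2, hd3, hd4, hd5, hd6, PySem.Chars.strIsdigit]
    by_cases hd7 : PySem.Chars.isdigit c7
    case neg => simp [pvPackLoop, hd0, hd1, hd2, hd3, hd4, hd5, hd6, hd7, PySem.Chars.strIsdigit]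
    -- all eight are digits
    have hrun : pvPackLoop [c0, c1, c2, c3, c4, c5, c6, c7] 0
        = some (pvDigitVal c0 * 2 ^ 28
            + (pvDigitVal c1 * 2 ^ 8 + pvDigitVal c2 * 2 ^ 4 + pvDigitVal c3) * 2 ^ 16
            + pvDigitVal c4 * 2 ^ 12
            + (pvDigitVal c5 * 2 ^ 8 + pvDigitVal c6 * 2 ^ 4 + pvDigitVal c7)) := by
      simp only [pvPackLoop, hd0, hd1, hd2, hd3, hd4, hd5, hd6, hd7, not_true,
        if_false, Nat.shiftLeft_eq]
      congr 1
      ring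
    rw [hrun]
    dsimp only
    have b0 := (pvIsdigit_iff c0).mp hd0
    have b1 := (pvIsdigit_iff c1).mp hd1
    have b2 := (pvIsdigit_iff c2).mp hd2
    have b3 := (pvIsdigit_iff c3).mp hd3
    have b4 := (pvIsdigit_iff c4).mp hd4
    have b5 := (pvIsdigit_iff c5).mp hd5
    have b6 := (pvIsdigit_iff c6).mp hd6
    have b7 := (pvIsdigit_iff c7).mp hd7
    have hiff := pvKey (pvDigitVal c0)
      (pvDigitVal c1 * 2 ^ 8 + pvDigitVal c2 * 2 ^ 4 + pvDigitVal c3)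
      (pvDigitVal c4)
      (pvDigitVal c5 * 2 ^ 8 + pvDigitVal c6 * 2 ^ 4 + pvDigitVal c7)
      (by unfold pvDigitVal; omega) (by unfold pvDigitVal; omega)
      (by unfold pvDigitVal; omega) (by unfold pvDigitVal; omega)
    rw [if_congr hiff rfl rfl]
    simp [PySem.Chars.strIsdigit, hd0, hd1, hd2, hd3, hd4, hd5, hd6, hd7,
      PySem.List.pyGetD]
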